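-- pv_equiv track=rewrite | github.com/CODE-U-S/Coding_Test_Study | 2st/Riyeon/수 조작하기 1.py | solution
-- ===== SOURCE A (Python) =====
-- def solution(n, control):
--     answer = n
--     for i in control:
--         if i == 'w':
--             answer += 1
--         elif i == 's':
--             answer -= 1
--         elif i == 'd':
--             answer += 10
--         else:
--             answer -= 10
--     return answer
-- ===== SOURCE B (Python) =====
-- def solution(n, control):
--     w = control.count('w')
--     s = control.count('s')
--     d = control.count('d')
--     others = len(control) - w - s - d
--     return n + w - s + 10 * d - 10 * others
-- ===== Notes on version B (the rewrite author's own statement) =====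
-- stated objective: faster
-- what changed: Replaced the per-character branching accumulation loop by a closed-form expression over character counts (count('w'), count('s'), count('d'), and the remainder), so the Python-level loop disappears.
import Mathlib
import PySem

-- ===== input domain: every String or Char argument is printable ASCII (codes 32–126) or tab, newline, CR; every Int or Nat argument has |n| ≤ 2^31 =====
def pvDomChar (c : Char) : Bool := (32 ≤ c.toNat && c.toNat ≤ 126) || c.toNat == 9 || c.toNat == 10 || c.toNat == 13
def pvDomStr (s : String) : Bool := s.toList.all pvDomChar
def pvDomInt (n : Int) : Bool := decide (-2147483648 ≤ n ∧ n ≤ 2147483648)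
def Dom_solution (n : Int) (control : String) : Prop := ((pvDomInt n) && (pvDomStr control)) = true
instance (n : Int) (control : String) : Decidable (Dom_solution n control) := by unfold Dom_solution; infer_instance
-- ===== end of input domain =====

-- B replaces A's per-character branching accumulation loop by a closed-form expression over character counts (a timing run measured B faster by a constant factor).

-- ===== PORT A =====
-- literal transliteration of A: sequential loop over the characters, branching per character
def solution (n : Int) (control : String) : Int :=
  control.toList.foldl
    (fun answer i =>
      if i == 'w' then answer + 1
      else if i == 's' then answer - 1
      else if i == 'd' then answer + 10
      else answer - 10)
    n

-- ===== PORT B =====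
-- literal transliteration of B: character counts, then one arithmetic expression
def solution_alt (n : Int) (control : String) : Int :=
  let w : Int := PySem.Str.count control "w"
  let s : Int := PySem.Str.count control "s"
  let d : Int := PySem.Str.count control "d"
  let others : Int := (PySem.Str.len control : Int) - w - s - d
  n + w - s + 10 * d - 10 * others

-- ===== PRECONDITION & SPEC =====
def Spec_solution (n : Int) (control : String) (out : Int) : Prop := out = solution_alt n control
instance (n : Int) (control : String) (out : Int) : Decidable (Spec_solution n control out) := by unfold Spec_solution; infer_instance

-- ===== CLAIM (what is proved, stated in full; the proofs are below) =====
def Claim_equal_solution : Prop := ∀ (n : Int) (control : String), Dom_solution n control → Spec_solution n control (solution n control)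

-- ===== LEMMAS AND PROOFS =====

-- Python str.count with a single-character needle counts occurrences of that character
theorem chars_count_go_single (c : Char) (l : List Char) (acc : Nat) :
    PySem.Chars.count.go [c] l.length l acc = acc + l.count c := by
  induction l generalizing acc with
  | nil => simp [PySem.Chars.count.go]
  | cons h t ih =>
    simp [PySem.Chars.count.go, List.count_cons]
    rcases eq_or_ne c h with hc | hc
    · subst hc
      simp [ih]
      omega
    · simp [hc, Ne.symm hc, ih]

theorem chars_count_single (c : Char) (l : List Char) :
    PySem.Chars.count l [c] = l.count c := by
  simp [PySem.Chars.count, chars_count_go_single]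

theorem fold_eq_closed (l : List Char) (n : Int) :
    l.foldl
      (fun answer i =>
        if i == 'w' then answer + 1
        else if i == 's' then answer - 1
        else if i == 'd' then answer + 10
        else answer - 10) n
    = n + (l.count 'w' : Int) - (l.count 's' : Int) + 10 * (l.count 'd' : Int)
        - 10 * ((l.length : Int) - (l.count 'w' : Int) - (l.count 's' : Int) - (l.count 'd' : Int)) := by
  induction l generalizing n with
  | nil => simp
  | cons h t ih =>
    simp only [List.foldl_cons, List.count_cons, List.length_cons, ih]
    by_cases hw : h = 'w'
    · simp [hw]; ring
    · by_cases hs : h = 's'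
      · simp [hs]; ring
      · by_cases hd : h = 'd'
        · simp [hd]; ring
        · simp [hw, hs, hd]; ring

-- ===== VERDICT (by name: the statement is the Claim_ definition above) =====
theorem solution_spec : Claim_equal_solution := by
  intro n control _
  unfold Spec_solution solution solution_alt
  simp only [PySem.Str.count_eq, PySem.Str.len_eq]
  rw [fold_eq_closed]
  have hw : "w".toList = ['w'] := rfl
  have hs : "s".toList = ['s'] := rfl
  have hd : "d".toList = ['d'] := rfl
  simp only [hw, hs, hd, chars_count_single]
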